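-- pv_equiv track=rewrite | github.com/jayantiii/LeetCode_blah | 2444-longest-ideal-subsequence/longest-ideal-subsequence.py | longestIdealString
-- ===== SOURCE A (Python) =====
-- def longestIdealString(s: str, k: int) -> int:
--     dp = [0]*(26) #longest subs found so far ending at that char
--
--     for ch in s:
--         a,z = ord('a'), ord('z')
--         # Check only letters within distance k
--         start = ord(ch) - k
--         end = ord(ch) + k
--
--         #make it in 0-25 range and # Use max/min to stay inside the 0-25 range
--         # max/min needed cause if char is 'a' ,start can go negative too
--         start = max(0,start - a)
--         end = min(25,end - a)
--         currch = ord(ch) - a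
--         bestprev = 0
--         for i in range(start, end+1): # end +1 needed
--             if dp[i] > bestprev:
--                 bestprev = dp[i]
--
--         dp[currch] = max(dp[currch],bestprev + 1)
--
--     return max(dp)
-- ===== SOURCE B (Python) =====
-- def longestIdealString(s: str, k: int) -> int:
--     # Position-indexed DP: dp holds (char code, longest ideal subsequence
--     # ending at that position) for each position, scanned in full per char.
--     dp = []
--     for ch in s:
--         o = ord(ch)
--         best = 0
--         for oj, vj in dp:
--             if abs(o - oj) <= k and vj > best:
--                 best = vj
--         dp.append((o, best + 1))
--     return max((v for _, v in dp), default=0)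
-- ===== Notes on version B (the rewrite author's own statement) =====
-- stated objective: alternative
-- what changed: Replaces A's single pass with a 26-slot per-letter array (inner scan over the letter window) by a position-indexed DP that keeps one (code, best-length) pair per position and scans all earlier positions for each character.
-- outside the precondition, e.g. on longestIdealString('Ga', 0): A returns 2, B returns 1
import Mathlib
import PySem

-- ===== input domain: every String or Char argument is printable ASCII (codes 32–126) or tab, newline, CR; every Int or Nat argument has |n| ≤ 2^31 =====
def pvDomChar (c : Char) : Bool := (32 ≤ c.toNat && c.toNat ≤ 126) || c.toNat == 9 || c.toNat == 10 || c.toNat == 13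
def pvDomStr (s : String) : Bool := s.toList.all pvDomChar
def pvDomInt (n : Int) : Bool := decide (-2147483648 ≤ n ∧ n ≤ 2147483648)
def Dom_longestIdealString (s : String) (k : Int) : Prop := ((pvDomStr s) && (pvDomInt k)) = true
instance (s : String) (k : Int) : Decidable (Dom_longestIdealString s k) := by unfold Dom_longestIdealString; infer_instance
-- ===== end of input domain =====

-- B replaces A's 26-slot per-letter array by a position-indexed DP over (code, length) pairs — alternative decomposition, same results on lowercase strings.

-- ===== PORT A =====
-- the body of A's 'for ch in s' loop; dp always has length 26, and the scanned
-- indices lie in 0..25, so pyGetD/pySetD are exact where Python does not raise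
def pvStepA (k : Int) (dp : List Int) (ch : Char) : List Int :=
  let a : Int := 97
  let start := (ch.toNat : Int) - k
  let fin := (ch.toNat : Int) + k
  let start := max 0 (start - a)
  let fin := min 25 (fin - a)
  let currch := (ch.toNat : Int) - a
  let bestprev := (PySem.List.pyRange start (fin + 1) 1).foldl
    (fun bestprev i =>
      if PySem.List.pyGetD dp i 0 > bestprev then PySem.List.pyGetD dp i 0 else bestprev) 0
  PySem.List.pySetD dp currch (max (PySem.List.pyGetD dp currch 0) (bestprev + 1))

def longestIdealString (s : String) (k : Int) : Int :=
  let dp := s.toList.foldl (pvStepA k) (List.replicate 26 (0 : Int))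
  -- max(dp): dp has length 26, never empty, so max? is always some
  (PySem.List.max? dp (fun x => x)).getD 0

-- ===== PORT B =====
-- the body of B's 'for ch in s' loop
def pvStepB (k : Int) (dp : List (Int × Int)) (ch : Char) : List (Int × Int) :=
  let o : Int := (ch.toNat : Int)
  let best := dp.foldl (fun best p => if |o - p.1| ≤ k ∧ p.2 > best then p.2 else best) 0
  dp ++ [(o, best + 1)]

def longestIdealString_alt (s : String) (k : Int) : Int :=
  let dp := s.toList.foldl (pvStepB k) ([] : List (Int × Int))
  PySem.List.maxD (dp.map Prod.snd) (fun v => v) 0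

-- ===== PRECONDITION & SPEC =====
-- Pre_ is the problem's natural domain: lowercase English letters. Outside it A
-- raises IndexError (character code < 71 or > 122), or — for codes 71..96 —
-- returns an accidental value via Python negative-index wraparound of dp[currch].
def Pre_longestIdealString (s : String) (k : Int) : Prop :=
  (s.toList.all (fun c => 97 ≤ c.toNat && c.toNat ≤ 122)) = true
instance (s : String) (k : Int) : Decidable (Pre_longestIdealString s k) := by
  unfold Pre_longestIdealString; infer_instance

def pvWitness_longestIdealString : String × Int := ("acfgb", 2)

def Spec_longestIdealString (s : String) (k : Int) (out : Int) : Prop :=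
  out = longestIdealString_alt s k
instance (s : String) (k : Int) (out : Int) : Decidable (Spec_longestIdealString s k out) := by
  unfold Spec_longestIdealString; infer_instance

-- ===== CLAIM (what is proved, stated in full; the proofs are below) =====
def Claim_equal_longestIdealString : Prop :=
  ∀ (s : String) (k : Int), Dom_longestIdealString s k → Pre_longestIdealString s k →
    Spec_longestIdealString s k (longestIdealString s k)

-- ===== LEMMAS AND PROOFS =====

-- the best length so far among B's pairs carrying letter code 97 + c
def pvSlot (c : Int) (l : List (Int × Int)) : Int :=
  l.foldl (fun m p => if p.1 = 97 + c then max m p.2 else m) 0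

-- coupling invariant between A's 26-slot array and B's pair list
def pvInv (dpA : List Int) (dpB : List (Int × Int)) : Prop :=
  dpA.length = 26 ∧
  (∀ p ∈ dpB, 97 ≤ p.1 ∧ p.1 ≤ 122 ∧ 1 ≤ p.2) ∧
  (∀ c : Int, 0 ≤ c → c < 26 → PySem.List.pyGetD dpA c 0 = pvSlot c dpB)

-- generic description of a conditional running max over pairs
theorem pv_foldCondMax_spec (Q : Int × Int → Prop) [DecidablePred Q]
    (l : List (Int × Int)) (b : Int) :
    ((l.foldl (fun m p => if Q p then max m p.2 else m) b) = b ∨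
      ∃ p ∈ l, Q p ∧ (l.foldl (fun m p => if Q p then max m p.2 else m) b) = p.2) ∧
    b ≤ (l.foldl (fun m p => if Q p then max m p.2 else m) b) ∧
    (∀ p ∈ l, Q p → p.2 ≤ (l.foldl (fun m p => if Q p then max m p.2 else m) b)) := by
  induction l generalizing b with
  | nil => simp
  | cons x t ih =>
    simp only [List.foldl_cons]
    by_cases hx : Q x
    · simp only [hx, if_pos]
      obtain ⟨h1, h2, h3⟩ := ih (max b x.2)
      refine ⟨?_, le_trans (le_max_left _ _) h2, ?_⟩
      · rcases h1 with h | ⟨p, hp, hq, he⟩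
        · rcases max_cases b x.2 with ⟨hm, _⟩ | ⟨hm, _⟩
          · exact Or.inl (by omega)
          · exact Or.inr ⟨x, List.mem_cons_self, hx, by omega⟩
        · exact Or.inr ⟨p, List.mem_cons_of_mem _ hp, hq, he⟩
      · intro p hp hq
        rcases List.mem_cons.mp hp with rfl | hp
        · exact le_trans (le_max_right _ _) h2
        · exact h3 p hp hq
    · simp only [hx, if_neg, not_false_iff]
      obtain ⟨h1, h2, h3⟩ := ih b
      refine ⟨?_, h2, ?_⟩
      · rcases h1 with h | ⟨p, hp, hq, he⟩
        · exact Or.inl h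
        · exact Or.inr ⟨p, List.mem_cons_of_mem _ hp, hq, he⟩
      · intro p hp hq
        rcases List.mem_cons.mp hp with rfl | hp
        · exact absurd hq hx
        · exact h3 p hp hq

-- same description for a running max of a function over a list of indices
theorem pv_foldMaxFun_spec (g : Int → Int) (l : List Int) (b : Int) :
    ((l.foldl (fun m i => max m (g i)) b) = b ∨
      ∃ i ∈ l, (l.foldl (fun m i => max m (g i)) b) = g i) ∧
    b ≤ (l.foldl (fun m i => max m (g i)) b) ∧
    (∀ i ∈ l, g i ≤ (l.foldl (fun m i => max m (g i)) b)) := by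
  induction l generalizing b with
  | nil => simp
  | cons x t ih =>
    simp only [List.foldl_cons]
    obtain ⟨h1, h2, h3⟩ := ih (max b (g x))
    refine ⟨?_, le_trans (le_max_left _ _) h2, ?_⟩
    · rcases h1 with h | ⟨i, hi, he⟩
      · rcases max_cases b (g x) with ⟨hm, _⟩ | ⟨hm, _⟩
        · exact Or.inl (by omega)
        · exact Or.inr ⟨x, List.mem_cons_self, by omega⟩
      · exact Or.inr ⟨i, List.mem_cons_of_mem _ hi, he⟩
    · intro i hi
      rcases List.mem_cons.mp hi with rfl | hi
      · exact le_trans (le_max_right _ _) h2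
      · exact h3 i hi

theorem pvSlot_spec (c : Int) (l : List (Int × Int)) :
    (pvSlot c l = 0 ∨ ∃ p ∈ l, p.1 = 97 + c ∧ pvSlot c l = p.2) ∧
    0 ≤ pvSlot c l ∧ (∀ p ∈ l, p.1 = 97 + c → p.2 ≤ pvSlot c l) :=
  pv_foldCondMax_spec (fun p => p.1 = 97 + c) l 0

theorem pvSlot_append (c : Int) (l : List (Int × Int)) (p : Int × Int) :
    pvSlot c (l ++ [p]) = if p.1 = 97 + c then max (pvSlot c l) p.2 else pvSlot c l := by
  simp [pvSlot, List.foldl_append]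

-- A's inner window scan equals B's inner pair scan, under the invariant
theorem pv_best_eq (k : Int) (dpA : List Int) (dpB : List (Int × Int)) (o : Int)
    (ho1 : 97 ≤ o) (ho2 : o ≤ 122) (hinv : pvInv dpA dpB) :
    (PySem.List.pyRange (max 0 (o - k - 97)) (min 25 (o + k - 97) + 1) 1).foldl
      (fun bestprev i =>
        if PySem.List.pyGetD dpA i 0 > bestprev then PySem.List.pyGetD dpA i 0 else bestprev) 0
    = dpB.foldl (fun best p => if |o - p.1| ≤ k ∧ p.2 > best then p.2 else best) 0 := by
  obtain ⟨hlen, hpairs, hslots⟩ := hinv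
  -- rewrite both folds into the canonical running-max shapes
  have hA : (PySem.List.pyRange (max 0 (o - k - 97)) (min 25 (o + k - 97) + 1) 1).foldl
      (fun bestprev i =>
        if PySem.List.pyGetD dpA i 0 > bestprev then PySem.List.pyGetD dpA i 0 else bestprev) 0
      = (PySem.List.pyRange (max 0 (o - k - 97)) (min 25 (o + k - 97) + 1) 1).foldl
      (fun m i => max m (pvSlot i dpB)) 0 := by
    apply PySem.List.foldl_congr_mem
    intro acc i hi
    rw [PySem.List.mem_pyRange_one] at hi
    rw [hslots i (by omega) (by omega)]
    rcases max_cases acc (pvSlot i dpB) with ⟨hm, hle⟩ | ⟨hm, hle⟩ <;> split <;> omega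
  have hB : dpB.foldl (fun best p => if |o - p.1| ≤ k ∧ p.2 > best then p.2 else best) 0
      = dpB.foldl (fun m p => if |o - p.1| ≤ k then max m p.2 else m) 0 := by
    apply PySem.List.foldl_congr_mem
    intro acc p hp
    by_cases hc : |o - p.1| ≤ k
    · simp only [hc, true_and, if_pos]
      rcases max_cases acc p.2 with ⟨hm, hle⟩ | ⟨hm, hle⟩ <;> split <;> omega
    · simp [hc]
  rw [hA, hB]
  obtain ⟨a1, a2, a3⟩ := pv_foldMaxFun_spec (fun i => pvSlot i dpB)
    (PySem.List.pyRange (max 0 (o - k - 97)) (min 25 (o + k - 97) + 1) 1) 0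
  obtain ⟨b1, b2, b3⟩ := pv_foldCondMax_spec (fun p => |o - p.1| ≤ k) dpB 0
  apply le_antisymm
  · -- A's max ≤ B's max
    rcases a1 with h | ⟨i, hi, he⟩
    · omega
    · rw [PySem.List.mem_pyRange_one] at hi
      obtain ⟨s1, _, s3⟩ := pvSlot_spec i dpB
      rcases s1 with hz | ⟨p, hp, hc, hv⟩
      · omega
      · obtain ⟨q1, q2, q3⟩ := hpairs p hp
        have := b3 p hp (abs_le.mpr ⟨by omega, by omega⟩)
        omega
  · -- B's max ≤ A's max
    rcases b1 with h | ⟨p, hp, hc, he⟩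
    · omega
    · rw [abs_le] at hc
      obtain ⟨hp1, hp2, _⟩ := hpairs p hp
      have hmem : (p.1 - 97) ∈ PySem.List.pyRange (max 0 (o - k - 97)) (min 25 (o + k - 97) + 1) 1 := by
        rw [PySem.List.mem_pyRange_one]
        omega
      have hs := (pvSlot_spec (p.1 - 97) dpB).2.2 p hp (by omega)
      have := a3 (p.1 - 97) hmem
      omega

-- one step of each loop preserves the invariant
theorem pv_step_inv (k : Int) (dpA : List Int) (dpB : List (Int × Int)) (ch : Char)
    (hc1 : 97 ≤ ch.toNat) (hc2 : ch.toNat ≤ 122) (hinv : pvInv dpA dpB) :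
    pvInv (pvStepA k dpA ch) (pvStepB k dpB ch) := by
  obtain ⟨hlen, hpairs, hslots⟩ := hinv
  have ho1 : (97 : Int) ≤ (ch.toNat : Int) := by exact_mod_cast hc1
  have ho2 : ((ch.toNat : Int)) ≤ 122 := by exact_mod_cast hc2
  have hbest := pv_best_eq k dpA dpB (ch.toNat : Int) ho1 ho2 ⟨hlen, hpairs, hslots⟩
  have hbnn : 0 ≤ dpB.foldl (fun best p => if |(ch.toNat : Int) - p.1| ≤ k ∧ p.2 > best then p.2 else best) 0 := by
    have := pv_foldCondMax_spec (fun p => |(ch.toNat : Int) - p.1| ≤ k ∧ p.2 > 0) dpB 0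
    -- use the canonical form instead
    rw [show dpB.foldl (fun best p => if |(ch.toNat : Int) - p.1| ≤ k ∧ p.2 > best then p.2 else best) 0
        = dpB.foldl (fun m p => if |(ch.toNat : Int) - p.1| ≤ k then max m p.2 else m) 0 from ?_]
    · exact (pv_foldCondMax_spec (fun p => |(ch.toNat : Int) - p.1| ≤ k) dpB 0).2.1
    · apply PySem.List.foldl_congr_mem
      intro acc p hp
      by_cases hc : |(ch.toNat : Int) - p.1| ≤ k
      · simp only [hc, true_and, if_pos]
        rcases max_cases acc p.2 with ⟨hm, hle⟩ | ⟨hm, hle⟩ <;> split <;> omega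
      · simp [hc]
  unfold pvStepA pvStepB
  simp only []
  set M := dpB.foldl (fun best p => if |(ch.toNat : Int) - p.1| ≤ k ∧ p.2 > best then p.2 else best) 0 with hM
  set curr : Int := (ch.toNat : Int) - 97 with hcurr
  have hcurrb : 0 ≤ curr ∧ curr < 26 := by omega
  have hsetlen : (PySem.List.pySetD dpA curr (max (PySem.List.pyGetD dpA curr 0) (M + 1))).length = 26 := by
    rw [PySem.List.pySetD_of_nonneg _ _ hcurrb.1]
    simp [hlen]
  refine ⟨by rw [hbest]; exact hsetlen, ?_, ?_⟩
  · intro p hp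
    rcases List.mem_append.mp hp with hp | hp
    · exact hpairs p hp
    · simp only [List.mem_singleton] at hp
      subst hp
      exact ⟨ho1, ho2, by omega⟩
  · intro c hc0 hc26
    rw [hbest]
    rw [pvSlot_append]
    have hget : PySem.List.pyGetD (PySem.List.pySetD dpA curr (max (PySem.List.pyGetD dpA curr 0) (M + 1))) c 0
        = if c = curr then max (PySem.List.pyGetD dpA curr 0) (M + 1) else PySem.List.pyGetD dpA c 0 := by
      rw [PySem.List.pySetD_of_nonneg _ _ hcurrb.1]
      rw [PySem.List.pyGetD_eq_getElem _ _ hc0 (by simpa [hlen] using hc26)]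
      rw [List.getElem_set]
      by_cases hceq : c = curr
      · rw [if_pos (by omega : curr.toNat = c.toNat), if_pos hceq]
      · rw [if_neg (by omega : ¬ curr.toNat = c.toNat), if_neg hceq]
        rw [PySem.List.pyGetD_eq_getElem _ _ hc0 (by simpa [hlen] using hc26)]
    rw [hget]
    by_cases hceq : c = curr
    · rw [if_pos hceq, if_pos (show ((ch.toNat : Int)) = 97 + c by omega), hceq,
        hslots curr hcurrb.1 hcurrb.2]
    · rw [if_neg hceq, if_neg (show ¬ ((ch.toNat : Int)) = 97 + c by omega)]
      exact hslots c hc0 hc26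

-- the whole loop preserves the invariant
theorem pv_fold_inv (k : Int) (l : List Char)
    (hl : ∀ c ∈ l, 97 ≤ c.toNat ∧ c.toNat ≤ 122)
    (dpA : List Int) (dpB : List (Int × Int)) (hinv : pvInv dpA dpB) :
    pvInv (l.foldl (pvStepA k) dpA) (l.foldl (pvStepB k) dpB) := by
  induction l generalizing dpA dpB with
  | nil => simpa using hinv
  | cons x t ih =>
    simp only [List.foldl_cons]
    have hx := hl x List.mem_cons_self
    exact ih (fun c hc => hl c (List.mem_cons_of_mem _ hc))
      _ _ (pv_step_inv k dpA dpB x hx.1 hx.2 hinv)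

theorem pv_inv_init : pvInv (List.replicate 26 (0 : Int)) [] := by
  refine ⟨by simp, by simp, ?_⟩
  intro c hc0 hc26
  rw [PySem.List.pyGetD_eq_getElem _ _ hc0 (by simpa using hc26)]
  rw [List.getElem_replicate]
  rfl

-- the final extractions agree under the invariant
theorem pv_final_eq (dpA : List Int) (dpB : List (Int × Int)) (hinv : pvInv dpA dpB) :
    (PySem.List.max? dpA (fun x => x)).getD 0
    = PySem.List.maxD (dpB.map Prod.snd) (fun v => v) 0 := by
  obtain ⟨hlen, hpairs, hslots⟩ := hinv
  obtain ⟨x, t, hxt⟩ : ∃ x t, dpA = x :: t := by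
    cases dpA with
    | nil => simp at hlen
    | cons x t => exact ⟨x, t, rfl⟩
  subst hxt
  rw [PySem.List.max?_id_cons]
  simp only [Option.getD_some]
  -- every element of dpA is a slot value, and every slot value ≤ the fold max
  have hAmax := PySem.List.le_foldl_max t x
  have hmemA : ∀ y ∈ (x :: t), y ≤ t.foldl max x := by
    intro y hy
    rcases List.mem_cons.mp hy with rfl | hy
    · exact hAmax.1
    · exact hAmax.2 y hy
  have hAmem : t.foldl max x = x ∨ t.foldl max x ∈ t := PySem.List.foldl_max_mem t x
  have hAval : ∃ c : Int, 0 ≤ c ∧ c < 26 ∧ t.foldl max x = pvSlot c dpB := by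
    have hmem : t.foldl max x ∈ (x :: t) := by
      rcases hAmem with h | h
      · rw [h]; exact List.mem_cons_self
      · exact List.mem_cons_of_mem _ h
    obtain ⟨n, hn, he⟩ := List.mem_iff_getElem.mp hmem
    refine ⟨(n : Int), by omega, by simp [hlen] at hn; omega, ?_⟩
    rw [← hslots (n : Int) (by omega) (by simp [hlen] at hn; omega)]
    rw [PySem.List.pyGetD_eq_getElem _ _ (by omega) (by simpa using hn)]
    simp [he]
  have hslotval : ∀ c : Int, 0 ≤ c → c < 26 → pvSlot c dpB ≤ t.foldl max x := by
    intro c hc0 hc26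
    rw [← hslots c hc0 hc26]
    apply hmemA
    have : PySem.List.pyGetD (x :: t) c 0 = (x :: t)[c.toNat] := by
      rw [PySem.List.pyGetD_eq_getElem _ _ hc0 (by simp [hlen]; omega)]
    rw [this]
    exact List.getElem_mem _
  -- B side
  cases hdpB : dpB with
  | nil =>
    subst hdpB
    simp only [List.map_nil]
    rw [show PySem.List.maxD ([] : List Int) (fun v => v) 0 = 0 from rfl]
    obtain ⟨c, hc0, hc26, hv⟩ := hAval
    have h0 : pvSlot c ([] : List (Int × Int)) = 0 := rfl
    omega
  | cons q r =>
    rw [← hdpB]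
    have hne : dpB.map Prod.snd ≠ [] := by simp [hdpB]
    obtain ⟨m, hm⟩ : ∃ m, PySem.List.max? (dpB.map Prod.snd) (fun v => v) = some m := by
      cases hq : PySem.List.max? (dpB.map Prod.snd) (fun v => v) with
      | none => exact absurd ((PySem.List.max?_eq_none_iff _ _).mp hq) hne
      | some m => exact ⟨m, rfl⟩
    have hmaxD : PySem.List.maxD (dpB.map Prod.snd) (fun v => v) 0 = m := by
      simp [PySem.List.maxD, hm]
    rw [hmaxD]
    have hmmem := PySem.List.max?_mem hm
    have hmmax := PySem.List.max?_isMax hm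
    apply le_antisymm
    · obtain ⟨c, hc0, hc26, hv⟩ := hAval
      obtain ⟨s1, _, _⟩ := pvSlot_spec c dpB
      rcases s1 with hz | ⟨p, hp, _, hpv⟩
      · -- slot is 0; m ≥ 1 since dpB nonempty and all values ≥ 1
        have hq1 := hpairs q (by simp [hdpB])
        have : q.2 ≤ m := hmmax q.2 (by simp [hdpB])
        omega
      · have : p.2 ≤ m := hmmax p.2 (List.mem_map_of_mem hp)
        omega
    · obtain ⟨p, hp, hpv⟩ := List.mem_map.mp hmmem
      obtain ⟨hp1, hp2, _⟩ := hpairs p hp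
      have hs := (pvSlot_spec (p.1 - 97) dpB).2.2 p hp (by omega)
      have := hslotval (p.1 - 97) (by omega) (by omega)
      omega

-- ===== VERDICT (by name: the statement is the Claim_ definition above) =====
theorem longestIdealString_spec : Claim_equal_longestIdealString := by
  intro s k _ hpre
  have hl : ∀ c ∈ s.toList, 97 ≤ c.toNat ∧ c.toNat ≤ 122 := by
    intro c hc
    have := List.all_eq_true.mp hpre c hc
    simp only [Bool.and_eq_true, decide_eq_true_eq] at this
    exact this
  unfold Spec_longestIdealString longestIdealString longestIdealString_alt
  exact pv_final_eq _ _ (pv_fold_inv k s.toList hl _ _ pv_inv_init)
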